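-- pv_equiv track=rewrite | github.com/Kawser-nerd/CLCDSA | Source Codes/AtCoder/arc098/A/4362783.py | solve
-- ===== SOURCE A (Python) =====
-- def solve(string):
--     # 1-origin
--     length = len(string)
--     east, west = [0] * (length + 1), [0] * (length + 2)
--
--     for i in range(1, length + 1):
--         if string[i - 1] == "W":
--             east[i] = east[i - 1] + 1
--         else:
--             east[i] = east[i - 1]
--     for j in range(length, 0, -1):
--         if string[j - 1] == "E":
--             west[j] = west[j + 1] + 1
--         else:
--             west[j] = west[j + 1]
--
--     ans = length
--     for k in range(1, length + 1):
--         ans = min(ans, east[k - 1] + west[k + 1])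
--     return ans
-- ===== SOURCE B (Python) =====
-- def solve(string):
--     total_e = string.count("E")
--     ans = len(string)
--     w = e = 0
--     for ch in string:
--         is_e = 1 if ch == "E" else 0
--         cost = w + (total_e - e - is_e)
--         if cost < ans:
--             ans = cost
--         if ch == "W":
--             w += 1
--         e += is_e
--     return ans
-- ===== Notes on version B (the rewrite author's own statement) =====
-- stated objective: faster
-- what changed: Replaced the two length-n prefix/suffix count arrays and three passes by a single forward pass keeping only two scalar running counters (W seen, E seen) plus the precomputed total E count, computing each split cost on the fly.
import Mathlib
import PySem

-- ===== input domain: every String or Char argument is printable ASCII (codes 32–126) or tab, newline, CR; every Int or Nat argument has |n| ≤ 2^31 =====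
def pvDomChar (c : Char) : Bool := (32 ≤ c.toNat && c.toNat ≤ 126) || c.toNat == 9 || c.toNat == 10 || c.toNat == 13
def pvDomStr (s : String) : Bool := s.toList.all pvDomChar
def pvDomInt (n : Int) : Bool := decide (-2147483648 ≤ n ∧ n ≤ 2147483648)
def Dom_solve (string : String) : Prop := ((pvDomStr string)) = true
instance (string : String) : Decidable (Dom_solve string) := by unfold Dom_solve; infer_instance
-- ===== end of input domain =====

-- B replaces A's two length-n prefix/suffix count arrays and three passes by one
-- forward pass with two scalar running counters and the total-'E' count (objective: faster by a constant factor, O(1) extra space).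

-- ===== PORT A =====
-- Every Python list index below is in range, so pyGetD's default is never read.
def solve (string : String) : Int :=
  let cs := string.toList
  let length : Int := (cs.length : Int)
  let east0 : List Int := List.replicate (cs.length + 1) 0
  let west0 : List Int := List.replicate (cs.length + 2) 0
  let east := (PySem.List.pyRange 1 (length + 1)).foldl
      (fun east i =>
        if PySem.List.pyGetD cs (i - 1) ' ' = 'W'
        then east.set i.toNat (PySem.List.pyGetD east (i - 1) 0 + 1)
        else east.set i.toNat (PySem.List.pyGetD east (i - 1) 0)) east0
  let west := (PySem.List.pyRange length 0 (-1)).foldl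
      (fun west j =>
        if PySem.List.pyGetD cs (j - 1) ' ' = 'E'
        then west.set j.toNat (PySem.List.pyGetD west (j + 1) 0 + 1)
        else west.set j.toNat (PySem.List.pyGetD west (j + 1) 0)) west0
  (PySem.List.pyRange 1 (length + 1)).foldl
      (fun ans k => min ans (PySem.List.pyGetD east (k - 1) 0 + PySem.List.pyGetD west (k + 1) 0)) length

-- ===== PORT B =====
def solve_alt (string : String) : Int :=
  let totalE : Int := (PySem.Str.count string "E" : Int)
  let r := string.toList.foldl
      (fun (s : Int × Int × Int) ch =>
        let isE : Int := if ch = 'E' then 1 else 0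
        let cost := s.2.1 + (totalE - s.2.2 - isE)
        (if cost < s.1 then cost else s.1,
         if ch = 'W' then s.2.1 + 1 else s.2.1,
         s.2.2 + isE)) ((string.toList.length : Int), 0, 0)
  r.1

-- ===== PRECONDITION & SPEC =====
def Spec_solve (string : String) (out : Int) : Prop := out = solve_alt string
instance (string : String) (out : Int) : Decidable (Spec_solve string out) := by unfold Spec_solve; infer_instance

-- ===== CLAIM (what is proved, stated in full; the proofs are below) =====
def Claim_equal_solve : Prop := ∀ (string : String), Dom_solve string → Spec_solve string (solve string)

-- ===== LEMMAS AND PROOFS =====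

-- cost of splitting at 0-based position i: W's strictly before i plus E's strictly after i
def pvCost (cs : List Char) (i : Nat) : Int :=
  ((cs.take i).count 'W' : Int) + ((cs.drop (i + 1)).count 'E' : Int)

def pvCosts (cs : List Char) : List Int :=
  (List.range cs.length).map (pvCost cs)

-- the east array of A after its first m iterations
def pvEast (cs : List Char) (m : Nat) : List Int :=
  (List.range (m + 1)).map (fun i => ((cs.take i).count 'W' : Int))
    ++ List.replicate (cs.length - m) 0

-- the west array of A after its iterations j = n, …, m+1
def pvWest (cs : List Char) (m : Nat) : List Int :=
  List.replicate (m + 1) 0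
    ++ (List.range' (m + 1) (cs.length - m)).map (fun j => ((cs.drop (j - 1)).count 'E' : Int))
    ++ [0]

-- PySem.Chars.count of a single-character needle is List.count (helper for the Str.count bridge)
theorem pv_go_cnt (c : Char) (fuel : Nat) : ∀ (l : List Char) (acc : Nat), l.length ≤ fuel →
    PySem.Chars.count.go [c] fuel l acc = acc + l.count c := by
  induction fuel with
  | zero => intro l acc h; rw [List.length_eq_zero_iff.1 (Nat.le_zero.1 h)]; rfl
  | succ f ih =>
    intro l acc h
    match l with
    | [] => rfl
    | x :: t =>
      rw [PySem.Chars.count.go]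
      by_cases hx : c = x
      · subst hx
        have hp : [c].isPrefixOf (c :: t) = true := by simp [List.isPrefixOf]
        simp [hp, ih t (acc + 1) (by simpa using h)]
        omega
      · have hp : [c].isPrefixOf (x :: t) = false := by
          simpa [List.isPrefixOf] using hx
        simp [hp, ih t acc (by simpa using h), Ne.symm hx]

theorem pv_cnt (cs : List Char) (c : Char) : PySem.Chars.count cs [c] = cs.count c := by
  unfold PySem.Chars.count
  simp [pv_go_cnt c cs.length cs 0 le_rfl]

theorem pvEast_fold (cs : List Char) (m : Nat) (hm : m ≤ cs.length) :
    (PySem.List.pyRange 1 ((m : Int) + 1)).foldl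
      (fun east i =>
        if PySem.List.pyGetD cs (i - 1) ' ' = 'W'
        then east.set i.toNat (PySem.List.pyGetD east (i - 1) 0 + 1)
        else east.set i.toNat (PySem.List.pyGetD east (i - 1) 0)) (List.replicate (cs.length + 1) 0)
    = pvEast cs m := by
  induction m with
  | zero =>
    show List.foldl _ _ (PySem.List.pyRange 1 1) = _
    rw [show PySem.List.pyRange 1 1 = [] from rfl]
    simp [pvEast, List.replicate_succ]
  | succ m ih =>
    have hm' : m ≤ cs.length := le_of_lt (Nat.lt_of_succ_le hm)
    rw [show ((m + 1 : Nat) : Int) + 1 = ((m : Int) + 1) + 1 by push_cast; ring,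
        PySem.List.pyRange_one_succ_right (by omega), List.foldl_append, ih hm']
    simp only [List.foldl_cons, List.foldl_nil]
    have hge : PySem.List.pyGetD cs ((m : Int) + 1 - 1) ' ' = cs.getD m ' ' := by
      rw [show (m : Int) + 1 - 1 = (m : Int) by ring, PySem.List.pyGetD_natCast]
    have hre : PySem.List.pyGetD (pvEast cs m) ((m : Int) + 1 - 1) 0
        = ((cs.take m).count 'W' : Int) := by
      rw [show (m : Int) + 1 - 1 = (m : Int) by ring, PySem.List.pyGetD_natCast, pvEast,
          List.getD_append _ _ _ m (by simp)]
      simp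
    have htn : ((m : Int) + 1).toNat = m + 1 := by omega
    have hset : ∀ v : Int, (pvEast cs m).set (m + 1) v
        = (List.range (m + 1)).map (fun i => ((cs.take i).count 'W' : Int)) ++ v :: List.replicate (cs.length - (m + 1)) 0 := by
      intro v
      rw [pvEast, List.set_append]
      have hlen : ¬ (m + 1 < ((List.range (m + 1)).map (fun i => ((cs.take i).count 'W' : Int))).length) := by simp
      rw [if_neg hlen]
      congr 1
      have : cs.length - m = (cs.length - (m + 1)) + 1 := by omega
      rw [this, List.replicate_succ]
      simp
    have hval : cs.getD m ' ' = 'W' →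
        ((cs.take m).count 'W' : Int) + 1 = ((cs.take (m+1)).count 'W' : Int) := by
      intro h
      rw [List.take_add_one]
      have : m < cs.length := by omega
      rw [List.getElem?_eq_getElem this]
      simp only [Option.toList_some, List.count_append]
      rw [List.getD_eq_getElem cs ' ' this] at h
      simp [h]
    have hval' : cs.getD m ' ' ≠ 'W' →
        ((cs.take m).count 'W' : Int) = ((cs.take (m+1)).count 'W' : Int) := by
      intro h
      rw [List.take_add_one]
      have hlt : m < cs.length := by omega
      rw [List.getElem?_eq_getElem hlt]
      simp only [Option.toList_some, List.count_append]
      rw [List.getD_eq_getElem cs ' ' hlt] at h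
      simp [h]
    have hpe : pvEast cs (m + 1)
        = (List.range (m + 1)).map (fun i => ((cs.take i).count 'W' : Int))
          ++ ((cs.take (m+1)).count 'W' : Int) :: List.replicate (cs.length - (m + 1)) 0 := by
      rw [pvEast, List.range_succ]
      simp
    rw [hge, hre, htn]
    by_cases h : cs.getD m ' ' = 'W'
    · rw [if_pos h, hset, hval h, hpe]
    · rw [if_neg h, hset, hval' h, hpe]

theorem pvWest_fold_aux (cs : List Char) (m : Nat) (hm : m ≤ cs.length) :
    (PySem.List.pyRange (m : Int) 0 (-1)).foldl
      (fun west j =>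
        if PySem.List.pyGetD cs (j - 1) ' ' = 'E'
        then west.set j.toNat (PySem.List.pyGetD west (j + 1) 0 + 1)
        else west.set j.toNat (PySem.List.pyGetD west (j + 1) 0)) (pvWest cs m)
    = pvWest cs 0 := by
  induction m with
  | zero => rfl
  | succ m ih =>
    have hm' : m ≤ cs.length := by omega
    rw [show ((m + 1 : Nat) : Int) = (m : Int) + 1 by push_cast; ring,
        PySem.List.pyRange_neg_one_cons (by omega),
        show ((m : Int) + 1 - 1) = (m : Int) from by ring]
    simp only [List.foldl_cons]
    have hge : PySem.List.pyGetD cs ((m : Int) + 1 - 1) ' ' = cs.getD m ' ' := by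
      rw [show (m : Int) + 1 - 1 = (m : Int) by ring, PySem.List.pyGetD_natCast]
    have hre : PySem.List.pyGetD (pvWest cs (m + 1)) ((m : Int) + 1 + 1) 0
        = ((cs.drop (m + 1)).count 'E' : Int) := by
      rw [show (m : Int) + 1 + 1 = ((m + 2 : Nat) : Int) by push_cast; ring,
          PySem.List.pyGetD_natCast, pvWest, List.append_assoc,
          List.getD_append_right _ _ _ _ (by simp)]
      simp only [List.length_replicate, Nat.sub_self]
      by_cases hend : m + 1 = cs.length
      · rw [show cs.length - (m + 1) = 0 by omega]
        simp [hend, List.drop_length]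
      · rw [show cs.length - (m + 1) = (cs.length - (m + 2)) + 1 by omega, List.range'_succ]
        simp
    have htn : ((m : Int) + 1).toNat = m + 1 := by omega
    have hset : ∀ v : Int, (pvWest cs (m + 1)).set (m + 1) v
        = List.replicate (m + 1) 0 ++ (v :: (List.range' (m + 2) (cs.length - (m + 1))).map (fun j => ((cs.drop (j - 1)).count 'E' : Int))) ++ [0] := by
      intro v
      have hsplit : pvWest cs (m + 1) = List.replicate (m + 1) 0
          ++ 0 :: ((List.range' (m + 2) (cs.length - (m + 1))).map (fun j => ((cs.drop (j - 1)).count 'E' : Int)) ++ [0]) := by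
        simp [pvWest, List.replicate_succ', List.append_assoc]
      rw [hsplit, List.set_append, if_neg (by simp)]
      simp [List.append_assoc]
    have hval : (if cs.getD m ' ' = 'E'
          then ((cs.drop (m + 1)).count 'E' : Int) + 1
          else ((cs.drop (m + 1)).count 'E' : Int))
        = ((cs.drop m).count 'E' : Int) := by
      have hlt : m < cs.length := by omega
      rw [List.drop_eq_getElem_cons hlt, List.count_cons,
          List.getD_eq_getElem cs ' ' hlt]
      by_cases h : cs[m] = 'E' <;> simp [h]
    have hpw : pvWest cs m
        = List.replicate (m + 1) 0 ++ (((cs.drop m).count 'E' : Int) :: (List.range' (m + 2) (cs.length - (m + 1))).map (fun j => ((cs.drop (j - 1)).count 'E' : Int))) ++ [0] := by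
      rw [pvWest, show cs.length - m = (cs.length - (m + 1)) + 1 by omega, List.range'_succ]
      simp
    rw [← ih hm']
    congr 1
    rw [hge, htn]
    by_cases h : cs.getD m ' ' = 'E'
    · rw [if_pos h, hre, hset, hpw, ← hval, if_pos h]
    · rw [if_neg h, hre, hset, hpw, ← hval, if_neg h]

theorem pvEast_get (cs : List Char) (k : Nat) (hk : k ≤ cs.length) :
    PySem.List.pyGetD (pvEast cs cs.length) (k : Int) 0 = ((cs.take k).count 'W' : Int) := by
  rw [PySem.List.pyGetD_natCast, pvEast,
      List.getD_append _ _ _ k (by simp; omega)]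
  rw [List.getD_eq_getElem _ _ (by simp; omega)]
  simp

theorem pvWest_get (cs : List Char) (k : Nat) (hk : k < cs.length) :
    PySem.List.pyGetD (pvWest cs 0) ((k + 2 : Nat) : Int) 0 = ((cs.drop (k + 1)).count 'E' : Int) := by
  rw [PySem.List.pyGetD_natCast, pvWest, List.append_assoc,
      List.getD_append_right _ _ _ _ (by simp)]
  simp only [List.length_replicate]
  rw [show k + 2 - 1 = k + 1 by omega]
  by_cases hend : k + 1 = cs.length
  · rw [show cs.length - 0 = cs.length from rfl]
    rw [List.getD_append_right _ _ _ _ (by simp; omega)]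
    simp [hend, List.drop_length]
  · rw [List.getD_append _ _ _ _ (by simp; omega)]
    rw [List.getD_eq_getElem _ _ (by simp; omega)]
    simp

theorem pvAns_fold (cs : List Char) (m : Nat) (hm : m ≤ cs.length) (a : Int) :
    (PySem.List.pyRange 1 ((m : Int) + 1)).foldl
      (fun ans k => min ans (PySem.List.pyGetD (pvEast cs cs.length) (k - 1) 0
        + PySem.List.pyGetD (pvWest cs 0) (k + 1) 0)) a
    = ((List.range m).map (pvCost cs)).foldl min a := by
  induction m generalizing a with
  | zero => rfl
  | succ m ih =>
    have hm' : m ≤ cs.length := by omega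
    rw [show ((m + 1 : Nat) : Int) + 1 = ((m : Int) + 1) + 1 by push_cast; ring,
        PySem.List.pyRange_one_succ_right (by omega), List.foldl_append,
        ih hm', List.range_succ, List.map_append, List.foldl_append]
    simp only [List.foldl_cons, List.foldl_nil, List.map_cons, List.map_nil]
    rw [show ((m : Int) + 1) - 1 = ((m : Nat) : Int) by ring,
        show ((m : Int) + 1) + 1 = ((m + 2 : Nat) : Int) by push_cast; ring,
        pvEast_get cs m hm', pvWest_get cs m (by omega)]
    rfl

theorem pvWest_init (cs : List Char) :
    pvWest cs cs.length = List.replicate (cs.length + 2) 0 := by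
  rw [pvWest, Nat.sub_self]
  simp [← List.replicate_succ']

theorem solve_eq_fold (s : String) :
    solve s = (pvCosts s.toList).foldl min (s.toList.length : Int) := by
  unfold solve
  dsimp only
  rw [pvEast_fold s.toList s.toList.length le_rfl,
      ← pvWest_init s.toList,
      pvWest_fold_aux s.toList s.toList.length le_rfl,
      pvAns_fold s.toList s.toList.length le_rfl]
  rfl

theorem pvAlt_fold (cs : List Char) (t : List Char) : ∀ (p : List Char), cs = p ++ t → ∀ (a : Int),
    (t.foldl
      (fun (s : Int × Int × Int) ch =>
        let isE : Int := if ch = 'E' then 1 else 0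
        let cost := s.2.1 + (((cs.count 'E' : Nat) : Int) - s.2.2 - isE)
        (if cost < s.1 then cost else s.1,
         if ch = 'W' then s.2.1 + 1 else s.2.1,
         s.2.2 + isE)) (a, ((p.count 'W' : Nat) : Int), ((p.count 'E' : Nat) : Int))).1
    = ((List.range t.length).map (fun i => pvCost cs (p.length + i))).foldl min a := by
  induction t with
  | nil => intro p hp a; rfl
  | cons c t' ih =>
    intro p hp a
    simp only [List.foldl_cons, List.length_cons]
    have hW : (if c = 'W' then ((p.count 'W' : Nat) : Int) + 1 else ((p.count 'W' : Nat) : Int))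
        = (((p ++ [c]).count 'W' : Nat) : Int) := by
      by_cases h : c = 'W' <;> simp [h, List.count_append]
    have hE : ((p.count 'E' : Nat) : Int) + (if c = 'E' then (1 : Int) else 0)
        = (((p ++ [c]).count 'E' : Nat) : Int) := by
      by_cases h : c = 'E' <;> simp [h, List.count_append]
    have hcost : ((p.count 'W' : Nat) : Int) + (((cs.count 'E' : Nat) : Int) - ((p.count 'E' : Nat) : Int) - (if c = 'E' then (1:Int) else 0))
        = pvCost cs p.length := by
      have h1 : cs.take p.length = p := by rw [hp]; simp
      have h2 : cs.drop (p.length + 1) = t' := by rw [hp]; simp [List.drop_append]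
      have h3 : cs.count 'E' = p.count 'E' + (if c = 'E' then 1 else 0) + t'.count 'E' := by
        rw [hp]; simp [List.count_append, List.count_cons]; by_cases h : c = 'E' <;> simp [h] <;> omega
      rw [pvCost, h1, h2, h3]
      by_cases h : c = 'E' <;> simp [h] <;> push_cast <;> ring
    rw [show (List.range (t'.length + 1)).map (fun i => pvCost cs (p.length + i))
        = pvCost cs p.length :: (List.range t'.length).map (fun i => pvCost cs ((p ++ [c]).length + i)) from ?_]
    · simp only [List.foldl_cons]
      rw [← ih (p ++ [c]) (by simp [hp]) (min a (pvCost cs p.length))]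
      simp only [hW, hE]
      congr 2
      rw [← hcost, min_def]
      refine Prod.ext ?_ rfl
      simp only
      split_ifs <;> omega
    · rw [List.range_succ_eq_map]
      simp only [List.map_cons, Nat.add_zero, List.map_map]
      congr 1
      apply List.map_congr_left
      intro i _
      simp only [Function.comp_apply]
      congr 1
      simp
      omega

theorem solve_alt_eq_fold (s : String) :
    solve_alt s = (pvCosts s.toList).foldl min (s.toList.length : Int) := by
  unfold solve_alt
  rw [show (PySem.Str.count s "E") = s.toList.count 'E' from by
    rw [PySem.Str.count_eq]; exact pv_cnt s.toList 'E']
  have h := pvAlt_fold s.toList s.toList [] rfl (s.toList.length : Int)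
  simp only [List.count_nil, Nat.cast_zero, List.length_nil] at h
  rw [h]
  unfold pvCosts
  congr 1
  apply List.map_congr_left
  intro i _
  simp

-- ===== VERDICT (by name: the statement is the Claim_ definition above) =====
theorem solve_spec : Claim_equal_solve := by
  intro s _
  unfold Spec_solve
  rw [solve_eq_fold, solve_alt_eq_fold]
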